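-- pv_equiv track=rewrite | github.com/Azitt/Leetcode | Knowing_WhattoT/Knowing_WhattoT.py | validate_anagram
-- ===== SOURCE A (Python) =====
-- def validate_anagram(str1,str2):
--     if len(str1) != len(str2):
--         return False
--     hash_map ={}
--     for s in str1:
--         hash_map[s] = hash_map.get(s,0) + 1
--     for s in str2:
--         hash_map[s] = hash_map.get(s,0) - 1
--     return all(f == 0 for f in hash_map.values())
-- ===== SOURCE B (Python) =====
-- def validate_anagram(str1, str2):
--     return sorted(str1) == sorted(str2)
-- ===== Notes on version B (the rewrite author's own statement) =====
-- stated objective: simpler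
-- what changed: Replaces the length guard plus counting hash-map pass with a single sort-and-compare: sorted(str1) == sorted(str2).
import Mathlib
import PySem

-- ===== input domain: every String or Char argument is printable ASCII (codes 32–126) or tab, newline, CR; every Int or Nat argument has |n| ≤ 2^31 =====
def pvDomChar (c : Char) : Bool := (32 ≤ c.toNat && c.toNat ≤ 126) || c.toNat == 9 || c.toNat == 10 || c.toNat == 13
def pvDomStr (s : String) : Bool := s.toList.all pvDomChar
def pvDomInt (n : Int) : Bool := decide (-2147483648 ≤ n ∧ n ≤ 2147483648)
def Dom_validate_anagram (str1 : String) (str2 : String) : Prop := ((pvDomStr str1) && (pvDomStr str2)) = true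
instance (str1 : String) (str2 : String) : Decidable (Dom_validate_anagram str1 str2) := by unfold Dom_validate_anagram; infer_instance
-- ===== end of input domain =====

-- B replaces A's length guard + counting hash map with a single sort-and-compare (simpler; return-value equivalence).

-- ===== PORT A =====
def validate_anagram (str1 : String) (str2 : String) : Bool :=
  if PySem.Str.len str1 ≠ PySem.Str.len str2 then false
  else
    let hm1 : PySem.Dict Char Int :=
      str1.toList.foldl (fun d s => d.insert s (d.getD s 0 + 1)) PySem.Dict.empty
    let hm2 : PySem.Dict Char Int :=
      str2.toList.foldl (fun d s => d.insert s (d.getD s 0 - 1)) hm1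
    hm2.values.all (fun f => f == 0)


-- ===== PORT B =====
def validate_anagram_alt (str1 : String) (str2 : String) : Bool :=
  PySem.List.sorted str1.toList (fun x => x) false == PySem.List.sorted str2.toList (fun x => x) false

-- ===== PRECONDITION & SPEC =====
def Spec_validate_anagram (str1 : String) (str2 : String) (out : Bool) : Prop := out = validate_anagram_alt str1 str2
instance (str1 : String) (str2 : String) (out : Bool) : Decidable (Spec_validate_anagram str1 str2 out) := by unfold Spec_validate_anagram; infer_instance

-- ===== CLAIM (what is proved, stated in full; the proofs are below) =====
def Claim_equal_validate_anagram : Prop := ∀ (str1 : String) (str2 : String), Dom_validate_anagram str1 str2 → Spec_validate_anagram str1 str2 (validate_anagram str1 str2)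

-- ===== LEMMAS AND PROOFS =====

-- A's second loop subtracts one per occurrence (the library only has the +1 twin).
theorem getD_foldl_insert_sub_one (l : List Char) (d : PySem.Dict Char Int) (v : Char) :
    (l.foldl (fun d x => d.insert x (d.getD x 0 - 1)) d).getD v 0 = d.getD v 0 - l.count v := by
  induction l generalizing d with
  | nil => simp
  | cons x xs ih =>
    simp only [List.foldl_cons, ih, PySem.Dict.getD_insert, List.count_cons]
    by_cases h : v = x
    · simp [h]
      ring
    · simp [h, Ne.symm h]

-- A's final dict holds count-in-l1 minus count-in-l2 for every char of either list; all zero ↔ equal counts everywhere.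
theorem values_all_zero_iff (l1 l2 : List Char) :
    ((l2.foldl (fun d x => d.insert x (d.getD x 0 - 1))
        (l1.foldl (fun d s => d.insert s (d.getD s 0 + 1))
          (PySem.Dict.empty : PySem.Dict Char Int))).values.all (fun f => f == 0)) = true ↔
    ∀ c : Char, l1.count c = l2.count c := by
  set d2 : PySem.Dict Char Int := l2.foldl (fun d x => d.insert x (d.getD x 0 - 1))
      (l1.foldl (fun d s => d.insert s (d.getD s 0 + 1)) PySem.Dict.empty) with hd2
  have hnd : d2.keys.Nodup :=
    PySem.Dict.nodup_keys_foldl_insert _ _ _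
      (PySem.Dict.nodup_keys_foldl_insert _ _ _ (by simp))
  have hval : ∀ c : Char, d2.getD c 0 = (l1.count c : Int) - l2.count c := by
    intro c
    rw [hd2, getD_foldl_insert_sub_one, PySem.Dict.getD_foldl_insert_add_one]
    simp
  rw [PySem.Dict.values_eq_map_keys d2 hnd 0, List.all_eq_true]
  constructor
  · intro h c
    by_cases hc : c ∈ d2.keys
    · have := h _ (List.mem_map.mpr ⟨c, hc, rfl⟩)
      rw [beq_iff_eq, hval] at this
      omega
    · rw [hd2, PySem.Dict.keys_foldl_insert, PySem.Dict.keys_foldl_insert] at hc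
      simp only [PySem.Set.mem_update] at hc
      have h1 : l1.count c = 0 := List.count_eq_zero.mpr (by simp at hc; tauto)
      have h2 : l2.count c = 0 := List.count_eq_zero.mpr (by simp at hc; tauto)
      omega
  · intro h f hf
    rw [List.mem_map] at hf
    obtain ⟨c, _, rfl⟩ := hf
    rw [beq_iff_eq, hval, h c]
    ring

theorem validate_anagram_eq_alt (str1 str2 : String) :
    validate_anagram str1 str2 = validate_anagram_alt str1 str2 := by
  unfold validate_anagram validate_anagram_alt
  rw [Bool.eq_iff_iff, beq_iff_eq, PySem.List.sorted_id_eq_sorted_id_iff_perm]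
  constructor
  · intro h
    split at h
    · exact absurd h (by simp)
    · rename_i hlen
      rw [List.perm_iff_count]
      exact (values_all_zero_iff str1.toList str2.toList).mp h
  · intro hp
    have hlen : str1.toList.length = str2.toList.length := hp.length_eq
    rw [if_neg (by rw [PySem.Str.len_eq, PySem.Str.len_eq, not_ne_iff, Nat.cast_inj]; exact hlen)]
    exact (values_all_zero_iff str1.toList str2.toList).mpr (List.perm_iff_count.mp hp)

-- ===== VERDICT (by name: the statement is the Claim_ definition above) =====
theorem validate_anagram_spec : Claim_equal_validate_anagram := by
  intro str1 str2 _
  exact validate_anagram_eq_alt str1 str2
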